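-- pv_equiv track=rewrite | github.com/bester2112/SAT-Solving-basiertes-Object-Packing | Hilfsprogramme/formFromPic/imageStructure.py | encode_figure
-- ===== SOURCE A (Python) =====
-- def encode_figure(figure):
--     min_x = min(block['pos'][0] for block in figure) // 4
--     min_y = min(block['pos'][1] for block in figure) // 4
--     max_x = max(block['pos'][0] for block in figure) // 4
--     max_y = max(block['pos'][1] for block in figure) // 4
--     encoded = [['.' for _ in range(min_x, max_x + 1)] for _ in range(min_y, max_y + 1)]
--     for block in figure:
--         encoded[(block['pos'][1] // 4) - min_y][(block['pos'][0] // 4) - min_x] = '#'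
--     return [''.join(line) for line in encoded]
-- ===== SOURCE B (Python) =====
-- def encode_figure(figure):
--     cells = [(block['pos'][0] // 4, block['pos'][1] // 4) for block in figure]
--     min_x, max_x = cells[0][0], cells[0][0]
--     min_y, max_y = cells[0][1], cells[0][1]
--     for x, y in cells[1:]:
--         if x < min_x:
--             min_x = x
--         if x > max_x:
--             max_x = x
--         if y < min_y:
--             min_y = y
--         if y > max_y:
--             max_y = y
--     occupied = set(cells)
--     return [''.join('#' if (x, y) in occupied else '.'
--                     for x in range(min_x, max_x + 1))
--             for y in range(min_y, max_y + 1)]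
-- ===== Notes on version B (the rewrite author's own statement) =====
-- stated objective: alternative
-- what changed: A runs four separate min()/max() passes over raw positions and scatter-writes '#' into a mutable 2D character grid indexed per block; B normalizes every block to a cell once, finds all four bounds in a single accumulator loop over the cells, and renders the figure by iterating grid coordinates and testing membership in a set of occupied cells.
import Mathlib
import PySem

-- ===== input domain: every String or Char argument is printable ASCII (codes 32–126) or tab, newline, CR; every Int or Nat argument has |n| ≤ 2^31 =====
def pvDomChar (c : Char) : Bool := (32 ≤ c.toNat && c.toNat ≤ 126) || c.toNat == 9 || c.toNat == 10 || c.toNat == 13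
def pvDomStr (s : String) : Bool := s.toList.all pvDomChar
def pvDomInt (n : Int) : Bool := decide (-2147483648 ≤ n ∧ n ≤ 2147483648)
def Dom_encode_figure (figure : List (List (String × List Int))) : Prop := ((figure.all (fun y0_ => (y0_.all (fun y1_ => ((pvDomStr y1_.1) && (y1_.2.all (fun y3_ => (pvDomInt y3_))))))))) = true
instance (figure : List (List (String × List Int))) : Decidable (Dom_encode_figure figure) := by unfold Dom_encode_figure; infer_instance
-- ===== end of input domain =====

-- B normalizes blocks to cells once, finds all four bounds in one accumulator pass, and
-- renders by querying a set of occupied cells instead of scatter-writing into a mutable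
-- grid; same output, same cost (objective: alternative).

-- ===== PORT A =====
-- block['pos'][i]; total form (defaults to 0), exact under Pre_ (key present, len ≥ 2)
def pvPosA (b : List (String × List Int)) (i : Int) : Int :=
  (((PySem.Dict.mk b).get? "pos").bind (fun p => PySem.List.pyGet? p i)).getD 0

def encode_figure (figure : List (List (String × List Int))) : List String :=
  let min_x := PySem.Int.floordiv ((PySem.List.min? (figure.map (fun b => pvPosA b 0)) (fun v => v)).getD 0) 4
  let min_y := PySem.Int.floordiv ((PySem.List.min? (figure.map (fun b => pvPosA b 1)) (fun v => v)).getD 0) 4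
  let max_x := PySem.Int.floordiv ((PySem.List.max? (figure.map (fun b => pvPosA b 0)) (fun v => v)).getD 0) 4
  let max_y := PySem.Int.floordiv ((PySem.List.max? (figure.map (fun b => pvPosA b 1)) (fun v => v)).getD 0) 4
  let encoded : List (List String) :=
    (PySem.List.pyRange min_y (max_y + 1) 1).map (fun _ =>
      (PySem.List.pyRange min_x (max_x + 1) 1).map (fun _ => "."))
  let encoded := figure.foldl (fun enc b =>
      PySem.List.pySetD enc (PySem.Int.floordiv (pvPosA b 1) 4 - min_y)
        (PySem.List.pySetD (PySem.List.pyGetD enc (PySem.Int.floordiv (pvPosA b 1) 4 - min_y) [])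
          (PySem.Int.floordiv (pvPosA b 0) 4 - min_x) "#")) encoded
  encoded.map (fun line => PySem.Str.join "" line)

-- ===== PORT B =====
def pvPosB (b : List (String × List Int)) (i : Int) : Int :=
  (((PySem.Dict.mk b).get? "pos").bind (fun p => PySem.List.pyGet? p i)).getD 0

-- the body of B's bounds loop: the four sequential if-updates of (min_x, max_x, min_y, max_y)
def pvStep (s : Int × Int × Int × Int) (c : Int × Int) : Int × Int × Int × Int :=
  let s := if c.1 < s.1 then (c.1, s.2.1, s.2.2.1, s.2.2.2) else s
  let s := if c.1 > s.2.1 then (s.1, c.1, s.2.2.1, s.2.2.2) else s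
  let s := if c.2 < s.2.2.1 then (s.1, s.2.1, c.2, s.2.2.2) else s
  if c.2 > s.2.2.2 then (s.1, s.2.1, s.2.2.1, c.2) else s

def encode_figure_alt (figure : List (List (String × List Int))) : List String :=
  let cells : List (Int × Int) := figure.map (fun b =>
    (PySem.Int.floordiv (pvPosB b 0) 4, PySem.Int.floordiv (pvPosB b 1) 4))
  let c0 : Int × Int := (PySem.List.pyGet? cells 0).getD (0, 0)
  let bounds := (PySem.List.slice cells (some 1) none).foldl pvStep (c0.1, c0.1, c0.2, c0.2)
  let occupied : PySem.Set (Int × Int) := PySem.Set.ofList cells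
  (PySem.List.pyRange bounds.2.2.1 (bounds.2.2.2 + 1) 1).map (fun y =>
    PySem.Str.join "" ((PySem.List.pyRange bounds.1 (bounds.2.1 + 1) 1).map (fun x =>
      if PySem.Set.contains occupied (x, y) then "#" else ".")))

-- ===== PRECONDITION & SPEC =====
-- Bool helper for Pre_: block has a 'pos' entry of length ≥ 2
def pvHasPos (b : List (String × List Int)) : Bool :=
  match (PySem.Dict.mk b).get? "pos" with
  | some p => decide (2 ≤ p.length)
  | none => false

-- Pre_ excludes exactly the inputs where the Python A raises: an empty figure (min() of an
-- empty sequence, ValueError) and blocks without a 'pos' list of length ≥ 2 (KeyError/IndexError).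
def Pre_encode_figure (figure : List (List (String × List Int))) : Prop :=
  figure ≠ [] ∧ figure.all pvHasPos = true
instance (figure : List (List (String × List Int))) : Decidable (Pre_encode_figure figure) := by
  unfold Pre_encode_figure; infer_instance

def pvWitness_encode_figure : (List (List (String × List Int))) := [[("pos", [5, 2])], [("pos", [0, 2])]]

def Spec_encode_figure (figure : List (List (String × List Int))) (out : List String) : Prop := out = encode_figure_alt figure
instance (figure : List (List (String × List Int))) (out : List String) : Decidable (Spec_encode_figure figure out) := by unfold Spec_encode_figure; infer_instance

-- ===== CLAIM (what is proved, stated in full; the proofs are below) =====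
def Claim_equal_encode_figure : Prop := ∀ (figure : List (List (String × List Int))), Dom_encode_figure figure → Pre_encode_figure figure → Spec_encode_figure figure (encode_figure figure)

-- ===== LEMMAS AND PROOFS =====

theorem pvPosB_eq_posA : pvPosB = pvPosA := rfl

-- setting an element of a range-map
theorem set_map_range {α : Type} (w n : Nat) (g : Nat → α) (v : α) :
    ((List.range w).map g).set n v
      = (List.range w).map (fun j => if j = n then v else g j) := by
  apply List.ext_getElem
  · simp
  · intro i h1 h2
    simp only [List.getElem_set, List.getElem_map, List.getElem_range]
    by_cases h : n = i <;> simp [h, eq_comm]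

set_option maxRecDepth 4000 in
-- the core grid lemma: folding the scatter-writes over a range-built grid marks exactly the hit cells
theorem grid_fold {α : Type} (bs : List α) (cx cy : α → Int) (w h : Nat)
    (hb : ∀ b ∈ bs, 0 ≤ cx b ∧ cx b < (w : Int) ∧ 0 ≤ cy b ∧ cy b < (h : Int)) :
    ∀ f : Nat → Nat → String,
    bs.foldl (fun enc b =>
        PySem.List.pySetD enc (cy b)
          (PySem.List.pySetD (PySem.List.pyGetD enc (cy b) []) (cx b) "#"))
      ((List.range h).map (fun (i : Nat) => (List.range w).map (fun (j : Nat) => f i j)))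
    = (List.range h).map (fun (i : Nat) => (List.range w).map (fun (j : Nat) =>
        if bs.any (fun b => cx b == (j : Int) && cy b == (i : Int)) then "#" else f i j)) := by
  induction bs with
  | nil => intro f; simp
  | cons b bs ih =>
    intro f
    have hbb := hb b (by simp)
    have hcy : (cy b).toNat < h := by omega
    have hcx : (cx b).toNat < w := by omega
    rw [List.foldl_cons]
    have hrow : PySem.List.pyGetD
        ((List.range h).map (fun (i : Nat) => (List.range w).map (fun (j : Nat) => f i j))) (cy b) []
        = (List.range w).map (fun j => f (cy b).toNat j) := by
      rw [PySem.List.pyGetD_of_nonneg _ _ hbb.2.2.1]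
      simp [List.getD, hcy]
    rw [hrow, PySem.List.pySetD_of_nonneg _ _ hbb.1,
        PySem.List.pySetD_of_nonneg _ _ hbb.2.2.1,
        set_map_range, set_map_range]
    have hstep : (List.range h).map (fun i => if i = (cy b).toNat
          then (List.range w).map (fun j => if j = (cx b).toNat then "#" else f (cy b).toNat j)
          else (List.range w).map (fun j => f i j))
        = (List.range h).map (fun i => (List.range w).map (fun j =>
            if i = (cy b).toNat ∧ j = (cx b).toNat then "#" else f i j)) := by
      apply List.map_congr_left
      intro i _
      by_cases h1 : i = (cy b).toNat
      · subst h1; simp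
      · simp [h1]
    rw [hstep, ih (fun b hm => hb b (by simp [hm]))]
    apply List.map_congr_left
    intro i hi
    apply List.map_congr_left
    intro j hj
    simp only [List.mem_range] at hi hj
    simp only [List.any_cons, Bool.or_eq_true, Bool.and_eq_true, beq_iff_eq]
    by_cases hrest : bs.any (fun b => cx b == (j : Int) && cy b == (i : Int)) = true
    · simp only [hrest, or_true, if_true]
    · simp only [hrest, Bool.false_eq_true, or_false, if_false]
      by_cases hhit : cx b = (j : Int) ∧ cy b = (i : Int)
      · have hidx : i = (cy b).toNat ∧ j = (cx b).toNat := by omega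
        rw [if_pos hidx, if_pos hhit]
      · have hidx : ¬ (i = (cy b).toNat ∧ j = (cx b).toNat) := by
          intro ⟨h1, h2⟩; exact hhit ⟨by omega, by omega⟩
        rw [if_neg hidx, if_neg hhit]

-- grid_fold specialised to the all-dots initial grid
theorem grid_fold_dot {α : Type} (bs : List α) (cx cy : α → Int) (w h : Nat)
    (hb : ∀ b ∈ bs, 0 ≤ cx b ∧ cx b < (w : Int) ∧ 0 ≤ cy b ∧ cy b < (h : Int)) :
    bs.foldl (fun enc b =>
        PySem.List.pySetD enc (cy b)
          (PySem.List.pySetD (PySem.List.pyGetD enc (cy b) []) (cx b) "#"))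
      ((List.range h).map (fun (_ : Nat) => (List.range w).map (fun (_ : Nat) => ".")))
    = (List.range h).map (fun (i : Nat) => (List.range w).map (fun (j : Nat) =>
        if bs.any (fun b => cx b == (j : Int) && cy b == (i : Int)) then "#" else ".")) :=
  grid_fold bs cx cy w h hb (fun _ _ => ".")

theorem fdiv_mono {a b : Int} (h : a ≤ b) :
    PySem.Int.floordiv a 4 ≤ PySem.Int.floordiv b 4 := by
  rw [PySem.Int.floordiv_eq_ediv_of_pos (by omega), PySem.Int.floordiv_eq_ediv_of_pos (by omega)]
  exact Int.ediv_le_ediv (by omega) h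

theorem fd_min (a b : Int) :
    PySem.Int.floordiv (min a b) 4 = min (PySem.Int.floordiv a 4) (PySem.Int.floordiv b 4) := by
  rcases le_total a b with h | h
  · rw [min_eq_left h, min_eq_left (fdiv_mono h)]
  · rw [min_eq_right h, min_eq_right (fdiv_mono h)]

theorem fd_max (a b : Int) :
    PySem.Int.floordiv (max a b) 4 = max (PySem.Int.floordiv a 4) (PySem.Int.floordiv b 4) := by
  rcases le_total a b with h | h
  · rw [max_eq_right h, max_eq_right (fdiv_mono h)]
  · rw [max_eq_left h, max_eq_left (fdiv_mono h)]

theorem foldl_min_fd (l : List Int) (a : Int) :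
    (l.map (fun x => PySem.Int.floordiv x 4)).foldl min (PySem.Int.floordiv a 4)
      = PySem.Int.floordiv (l.foldl min a) 4 := by
  induction l generalizing a with
  | nil => rfl
  | cons x t ih => simp only [List.map_cons, List.foldl_cons, ← fd_min, ih]

theorem foldl_max_fd (l : List Int) (a : Int) :
    (l.map (fun x => PySem.Int.floordiv x 4)).foldl max (PySem.Int.floordiv a 4)
      = PySem.Int.floordiv (l.foldl max a) 4 := by
  induction l generalizing a with
  | nil => rfl
  | cons x t ih => simp only [List.map_cons, List.foldl_cons, ← fd_max, ih]

theorem pvStep_eq (s : Int × Int × Int × Int) (c : Int × Int) :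
    pvStep s c = (min s.1 c.1, max s.2.1 c.1, min s.2.2.1 c.2, max s.2.2.2 c.2) := by
  obtain ⟨a, b, d, e⟩ := s
  obtain ⟨x, y⟩ := c
  simp only [pvStep, min_def, max_def]
  split_ifs <;> simp_all <;> omega

-- the single bounds pass computes the four extrema componentwise
theorem fold4 (l : List (Int × Int)) (a b c d : Int) :
    l.foldl pvStep (a, b, c, d)
      = ((l.map Prod.fst).foldl min a, (l.map Prod.fst).foldl max b,
         (l.map Prod.snd).foldl min c, (l.map Prod.snd).foldl max d) := by
  induction l generalizing a b c d with
  | nil => rfl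
  | cons p t ih => simp only [List.foldl_cons, List.map_cons, pvStep_eq, ih]

theorem foldl_min_fd' {β : Type} (f : β → Int) (l : List β) (a : β) :
    (l.map (fun b => PySem.Int.floordiv (f b) 4)).foldl min (PySem.Int.floordiv (f a) 4)
      = PySem.Int.floordiv ((l.map f).foldl min (f a)) 4 := by
  have h := foldl_min_fd (l.map f) (f a)
  rw [List.map_map] at h
  exact h

theorem foldl_max_fd' {β : Type} (f : β → Int) (l : List β) (a : β) :
    (l.map (fun b => PySem.Int.floordiv (f b) 4)).foldl max (PySem.Int.floordiv (f a) 4)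
      = PySem.Int.floordiv ((l.map f).foldl max (f a)) 4 := by
  have h := foldl_max_fd (l.map f) (f a)
  rw [List.map_map] at h
  exact h

-- ===== VERDICT (by name: the statement is the Claim_ definition above) =====
theorem encode_figure_spec : Claim_equal_encode_figure := by
  intro figure _ hpre
  unfold Spec_encode_figure
  obtain ⟨hne, _⟩ := hpre
  cases figure with
  | nil => exact absurd rfl hne
  | cons b0 rest =>
  simp only [encode_figure, encode_figure_alt, pvPosB_eq_posA, List.map_cons,
    PySem.List.min?_id_cons, PySem.List.max?_id_cons, Option.getD_some,
    PySem.List.slice_from_one, List.tail_cons]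
  -- B's cells[0]
  have hget0 : ∀ (x : Int × Int) (l : List (Int × Int)),
      (PySem.List.pyGet? (x :: l) 0).getD (0, 0) = x := by
    intro x l; simp [PySem.List.pyGet?, PySem.List.pyIdx?]
  rw [hget0, fold4]
  -- the four bounds of B equal A's four floordiv'd extrema
  set mx := (rest.map (fun b => pvPosA b 0)).foldl min (pvPosA b0 0) with hmxdef
  set Mx := (rest.map (fun b => pvPosA b 0)).foldl max (pvPosA b0 0) with hMxdef
  set my := (rest.map (fun b => pvPosA b 1)).foldl min (pvPosA b0 1) with hmydef
  set My := (rest.map (fun b => pvPosA b 1)).foldl max (pvPosA b0 1) with hMydef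
  have hmapfst : (rest.map (fun b =>
        (PySem.Int.floordiv (pvPosA b 0) 4, PySem.Int.floordiv (pvPosA b 1) 4))).map Prod.fst
      = rest.map (fun b => PySem.Int.floordiv (pvPosA b 0) 4) := by
    rw [List.map_map]; rfl
  have hmapsnd : (rest.map (fun b =>
        (PySem.Int.floordiv (pvPosA b 0) 4, PySem.Int.floordiv (pvPosA b 1) 4))).map Prod.snd
      = rest.map (fun b => PySem.Int.floordiv (pvPosA b 1) 4) := by
    rw [List.map_map]; rfl
  rw [hmapfst, hmapsnd, foldl_min_fd' (fun b => pvPosA b 0), foldl_max_fd' (fun b => pvPosA b 0),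
      foldl_min_fd' (fun b => pvPosA b 1), foldl_max_fd' (fun b => pvPosA b 1)]
  -- extremal facts
  have hmx : PySem.List.min? (pvPosA b0 0 :: rest.map (fun b => pvPosA b 0)) (fun v => v) = some mx :=
    PySem.List.min?_id_cons _ _
  have hMx : PySem.List.max? (pvPosA b0 0 :: rest.map (fun b => pvPosA b 0)) (fun v => v) = some Mx :=
    PySem.List.max?_id_cons _ _
  have hmy : PySem.List.min? (pvPosA b0 1 :: rest.map (fun b => pvPosA b 1)) (fun v => v) = some my :=
    PySem.List.min?_id_cons _ _
  have hMy : PySem.List.max? (pvPosA b0 1 :: rest.map (fun b => pvPosA b 1)) (fun v => v) = some My :=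
    PySem.List.max?_id_cons _ _
  have hmem : ∀ b ∈ b0 :: rest, ∀ i : Int,
      pvPosA b i ∈ pvPosA b0 i :: rest.map (fun b => pvPosA b i) := by
    intro b hb i
    rcases List.mem_cons.1 hb with h | h
    · subst h; exact List.mem_cons_self
    · exact List.mem_cons_of_mem _ (List.mem_map_of_mem h)
  have hxlo : ∀ b ∈ b0 :: rest,
      PySem.Int.floordiv mx 4 ≤ PySem.Int.floordiv (pvPosA b 0) 4 := fun b hb =>
    fdiv_mono (PySem.List.min?_isMin hmx _ (hmem b hb 0))
  have hxhi : ∀ b ∈ b0 :: rest,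
      PySem.Int.floordiv (pvPosA b 0) 4 ≤ PySem.Int.floordiv Mx 4 := fun b hb =>
    fdiv_mono (PySem.List.max?_isMax hMx _ (hmem b hb 0))
  have hylo : ∀ b ∈ b0 :: rest,
      PySem.Int.floordiv my 4 ≤ PySem.Int.floordiv (pvPosA b 1) 4 := fun b hb =>
    fdiv_mono (PySem.List.min?_isMin hmy _ (hmem b hb 1))
  have hyhi : ∀ b ∈ b0 :: rest,
      PySem.Int.floordiv (pvPosA b 1) 4 ≤ PySem.Int.floordiv My 4 := fun b hb =>
    fdiv_mono (PySem.List.max?_isMax hMy _ (hmem b hb 1))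
  have hxm : PySem.Int.floordiv mx 4 ≤ PySem.Int.floordiv Mx 4 :=
    le_trans (hxlo b0 (by simp)) (hxhi b0 (by simp))
  have hym : PySem.Int.floordiv my 4 ≤ PySem.Int.floordiv My 4 :=
    le_trans (hylo b0 (by simp)) (hyhi b0 (by simp))
  set w : Nat := (PySem.Int.floordiv Mx 4 + 1 - PySem.Int.floordiv mx 4).toNat with hwdef
  set h : Nat := (PySem.Int.floordiv My 4 + 1 - PySem.Int.floordiv my 4).toNat with hhdef
  have hw : (w : Int) = PySem.Int.floordiv Mx 4 + 1 - PySem.Int.floordiv mx 4 :=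
    Int.toNat_of_nonneg (by omega)
  have hh : (h : Int) = PySem.Int.floordiv My 4 + 1 - PySem.Int.floordiv my 4 :=
    Int.toNat_of_nonneg (by omega)
  have hbounds : ∀ b ∈ b0 :: rest,
      0 ≤ PySem.Int.floordiv (pvPosA b 0) 4 - PySem.Int.floordiv mx 4 ∧
      PySem.Int.floordiv (pvPosA b 0) 4 - PySem.Int.floordiv mx 4 < (w : Int) ∧
      0 ≤ PySem.Int.floordiv (pvPosA b 1) 4 - PySem.Int.floordiv my 4 ∧
      PySem.Int.floordiv (pvPosA b 1) 4 - PySem.Int.floordiv my 4 < (h : Int) := by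
    intro b hb
    have h1 := hxlo b hb; have h2 := hxhi b hb
    have h3 := hylo b hb; have h4 := hyhi b hb
    refine ⟨by omega, by rw [hw]; omega, by omega, by rw [hh]; omega⟩
  -- A's initial grid as a range-map
  have hg0 : (PySem.List.pyRange (PySem.Int.floordiv my 4) (PySem.Int.floordiv My 4 + 1)).map
        (fun _ => (PySem.List.pyRange (PySem.Int.floordiv mx 4) (PySem.Int.floordiv Mx 4 + 1)).map
          (fun _ => "."))
      = (List.range h).map (fun (_ : Nat) => (List.range w).map (fun (_ : Nat) => ".")) := by
    rw [PySem.List.pyRange_one, PySem.List.pyRange_one, List.map_map, List.map_map]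
    rfl
  rw [hg0, grid_fold_dot (b0 :: rest)
        (fun b => PySem.Int.floordiv (pvPosA b 0) 4 - PySem.Int.floordiv mx 4)
        (fun b => PySem.Int.floordiv (pvPosA b 1) 4 - PySem.Int.floordiv my 4) w h hbounds,
      List.map_map]
  -- B's ranges
  rw [PySem.List.pyRange_one (PySem.Int.floordiv my 4) (PySem.Int.floordiv My 4 + 1),
      PySem.List.pyRange_one (PySem.Int.floordiv mx 4) (PySem.Int.floordiv Mx 4 + 1),
      List.map_map]
  have hYn : (PySem.Int.floordiv My 4 + 1 - PySem.Int.floordiv my 4).toNat = h := rfl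
  rw [hYn]
  apply List.map_congr_left
  intro i hi
  simp only [Function.comp]
  congr 1
  rw [List.map_map]
  apply List.map_congr_left
  intro j hj
  simp only [Function.comp]
  simp only [List.mem_range] at hi hj
  have hcond : ((PySem.Set.ofList ((b0 :: rest).map (fun b =>
        (PySem.Int.floordiv (pvPosA b 0) 4, PySem.Int.floordiv (pvPosA b 1) 4)))).contains
          (PySem.Int.floordiv mx 4 + (j : Int), PySem.Int.floordiv my 4 + (i : Int)))
      = (b0 :: rest).any (fun b =>
          (PySem.Int.floordiv (pvPosA b 0) 4 - PySem.Int.floordiv mx 4) == (j : Int) &&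
          (PySem.Int.floordiv (pvPosA b 1) 4 - PySem.Int.floordiv my 4) == (i : Int)) := by
    rw [Bool.eq_iff_iff]
    simp only [PySem.Set.contains_iff, PySem.Set.mem_ofList, List.mem_map, List.any_eq_true,
      Bool.and_eq_true, beq_iff_eq, Prod.mk.injEq]
    constructor
    · rintro ⟨b, hb, h1, h2⟩; exact ⟨b, hb, by omega, by omega⟩
    · rintro ⟨b, hb, h1, h2⟩; exact ⟨b, hb, by omega, by omega⟩
  rw [← hcond]
  rfl
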